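-- pv_equiv track=rewrite | github.com/Divija-reddy/Machine-Learning-Lab | Lab-02_Purchase_Data_Analysis/lab02_q7.py | compute_frequencies
-- ===== SOURCE A (Python) =====
-- def compute_frequencies(vector1, vector2):
--     """
--     Computes f11, f10, f01, f00
--     """
--     f11 = f10 = f01 = f00 = 0
--     for v1, v2 in zip(vector1, vector2):
--         if v1 == 1 and v2 == 1:
--             f11 += 1
--         elif v1 == 1 and v2 == 0:
--             f10 += 1
--         elif v1 == 0 and v2 == 1:
--             f01 += 1
--         else:
--             f00 += 1
--     return f11, f10, f01, f00
-- ===== SOURCE B (Python) =====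
-- _CODE = {(1, 1): 0, (1, 0): 1, (0, 1): 2}
--
-- def compute_frequencies(vector1, vector2):
--     """
--     Computes f11, f10, f01, f00
--     """
--     codes = [_CODE.get(pair, 3) for pair in zip(vector1, vector2)]
--     return codes.count(0), codes.count(1), codes.count(2), codes.count(3)
-- ===== Notes on version B (the rewrite author's own statement) =====
-- stated objective: alternative
-- what changed: Replaces the single branch-and-tally loop with a two-stage classify-then-count: each pair is mapped to a code 0..3 via a lookup table (default 3 reproducing the catch-all else), then each of the four frequencies is read off with list.count over the code list.
import Mathlib
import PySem

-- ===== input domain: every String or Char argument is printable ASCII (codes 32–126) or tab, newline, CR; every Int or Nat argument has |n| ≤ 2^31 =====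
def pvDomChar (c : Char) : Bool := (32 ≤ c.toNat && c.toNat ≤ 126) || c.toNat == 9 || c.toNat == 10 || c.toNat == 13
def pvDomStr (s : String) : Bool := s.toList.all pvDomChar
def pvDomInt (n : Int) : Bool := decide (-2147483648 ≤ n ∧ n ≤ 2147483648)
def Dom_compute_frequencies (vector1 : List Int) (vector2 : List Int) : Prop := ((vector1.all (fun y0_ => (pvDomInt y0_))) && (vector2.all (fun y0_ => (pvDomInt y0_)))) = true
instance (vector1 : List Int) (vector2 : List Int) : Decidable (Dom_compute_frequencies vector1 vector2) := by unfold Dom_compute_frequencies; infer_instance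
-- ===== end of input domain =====

-- B replaces A's branch-and-tally loop with classify-then-count: map pairs to codes via a lookup table, then list.count each code; alternative decomposition, same cost.


-- ===== PORT A =====
-- A: one fold over the zipped vectors with a 4-tuple accumulator, if/elif chain in source order.
def compute_frequencies (vector1 : List Int) (vector2 : List Int) : Int × Int × Int × Int :=
  (List.zip vector1 vector2).foldl
    (fun (s : Int × Int × Int × Int) p =>
      if p.1 == 1 && p.2 == 1 then (s.1 + 1, s.2.1, s.2.2.1, s.2.2.2)
      else if p.1 == 1 && p.2 == 0 then (s.1, s.2.1 + 1, s.2.2.1, s.2.2.2)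
      else if p.1 == 0 && p.2 == 1 then (s.1, s.2.1, s.2.2.1 + 1, s.2.2.2)
      else (s.1, s.2.1, s.2.2.1, s.2.2.2 + 1))
    (0, 0, 0, 0)

-- ===== PORT B =====
-- B: classify each pair into a code 0..3 via the module-level lookup table (.get default 3), then count each code.
def pvCODE : PySem.Dict (Int × Int) Int :=
  PySem.Dict.ofList [((1, 1), 0), ((1, 0), 1), ((0, 1), 2)]

def compute_frequencies_alt (vector1 : List Int) (vector2 : List Int) : Int × Int × Int × Int :=
  let codes := (List.zip vector1 vector2).map (fun pair => pvCODE.getD pair 3)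
  ((codes.count 0 : Int), (codes.count 1 : Int), (codes.count 2 : Int), (codes.count 3 : Int))

-- ===== PRECONDITION & SPEC =====
def Spec_compute_frequencies (vector1 : List Int) (vector2 : List Int) (out : Int × Int × Int × Int) : Prop := out = compute_frequencies_alt vector1 vector2
instance (vector1 : List Int) (vector2 : List Int) (out : Int × Int × Int × Int) : Decidable (Spec_compute_frequencies vector1 vector2 out) := by unfold Spec_compute_frequencies; infer_instance

-- ===== CLAIM =====
def Claim_equal_compute_frequencies : Prop := ∀ (vector1 : List Int) (vector2 : List Int), Dom_compute_frequencies vector1 vector2 → Spec_compute_frequencies vector1 vector2 (compute_frequencies vector1 vector2)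

-- ===== LEMMAS AND PROOFS =====

-- The lookup table as an if-chain on the pair.
theorem pvCODE_getD (x y : Int) :
    pvCODE.getD (x, y) 3 =
      if x == 1 && y == 1 then 0 else if x == 1 && y == 0 then 1
      else if x == 0 && y == 1 then 2 else 3 := by
  rw [show pvCODE = PySem.Dict.mk [((1, 1), 0), ((1, 0), 1), ((0, 1), 2)] from rfl]
  simp only [PySem.Dict.getD, PySem.Dict.get?_mk_cons]
  split_ifs <;> simp_all [Prod.ext_iff, PySem.Dict.get?] <;> omega

-- A's fold, from any start, adds the per-branch counts (branch tests are mutually exclusive, so elif = plain tests).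
theorem compute_frequencies_foldl (l : List (Int × Int)) (a b c d : Int) :
    l.foldl
      (fun (s : Int × Int × Int × Int) p =>
        if p.1 == 1 && p.2 == 1 then (s.1 + 1, s.2.1, s.2.2.1, s.2.2.2)
        else if p.1 == 1 && p.2 == 0 then (s.1, s.2.1 + 1, s.2.2.1, s.2.2.2)
        else if p.1 == 0 && p.2 == 1 then (s.1, s.2.1, s.2.2.1 + 1, s.2.2.2)
        else (s.1, s.2.1, s.2.2.1, s.2.2.2 + 1))
      (a, b, c, d)
    = (a + l.countP (fun p => p.1 == 1 && p.2 == 1),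
       b + l.countP (fun p => p.1 == 1 && p.2 == 0),
       c + l.countP (fun p => p.1 == 0 && p.2 == 1),
       d + l.countP (fun p => !(p.1 == 1 && p.2 == 1) && !(p.1 == 1 && p.2 == 0) && !(p.1 == 0 && p.2 == 1))) := by
  induction l generalizing a b c d with
  | nil => simp
  | cons p t ih =>
    obtain ⟨x, y⟩ := p
    simp only [List.foldl_cons, List.countP_cons]
    split_ifs with h1 h2 h3 <;>
      rw [ih] <;> simp_all [Prod.ext_iff] <;> omega

-- counting a code in the classified list is counting the matching pairs
theorem count_code (l : List (Int × Int)) (k : Int) :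
    (l.map (fun pair => pvCODE.getD pair 3)).count k
      = l.countP (fun p => pvCODE.getD p 3 == k) := by
  simp [List.count_eq_countP, List.countP_map, Function.comp_def, BEq.comm]

-- ===== VERDICT =====
theorem compute_frequencies_spec : Claim_equal_compute_frequencies := by
  intro v1 v2 _
  unfold Spec_compute_frequencies compute_frequencies compute_frequencies_alt
  rw [compute_frequencies_foldl]
  simp only [count_code]
  refine Prod.ext ?_ (Prod.ext ?_ (Prod.ext ?_ ?_)) <;>
    simp only [] <;>
    rw [show ∀ z : Int, (0 : Int) + z = z from fun z => by ring] <;>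
    · congr 1
      apply List.countP_congr
      intro p _
      obtain ⟨x, y⟩ := p
      rw [pvCODE_getD]
      split_ifs <;> simp_all <;> tauto
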